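-- pv_equiv track=rewrite | github.com/Kartikay26/CodeForces-solutions | codeforces/1426/C.py | solve
-- ===== SOURCE A (Python) =====
-- def solve(n):
-- 	x = -1
-- 	b = int(1e8)
-- 	while b >= 1:
-- 		while maxsum(x+b) < n:
-- 			x += b
-- 		b //= 2
-- 	return x+1
--
-- def maxsum(n):
-- 	return (1+n//2) * (1+(n+1)//2)
-- ===== SOURCE B (Python) =====
-- # B: closed form via integer square root (Newton) instead of binary search.
-- def solve(n):
--     if n <= 1:
--         return 0
--     r = _isqrt(n - 1)
--     m = 2 * r - 1
--     return m if maxsum(m) >= n else m + 1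
--
-- def maxsum(n):
--     return (1+n//2) * (1+(n+1)//2)
--
-- def _isqrt(n):
--     x = n
--     y = (x + 1) // 2
--     while y < x:
--         x = y
--         y = (x + n // x) // 2
--     return x
-- ===== Notes on version B (the rewrite author's own statement) =====
-- stated objective: alternative
-- what changed: A binary-searches (b from 1e8 halving, advancing x) for the minimal m with maxsum(m) >= n; B computes it directly from an integer square root of n-1 (Newton isqrt), choosing between the two candidates 2r-1 and 2r with one maxsum check.
import Mathlib
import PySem

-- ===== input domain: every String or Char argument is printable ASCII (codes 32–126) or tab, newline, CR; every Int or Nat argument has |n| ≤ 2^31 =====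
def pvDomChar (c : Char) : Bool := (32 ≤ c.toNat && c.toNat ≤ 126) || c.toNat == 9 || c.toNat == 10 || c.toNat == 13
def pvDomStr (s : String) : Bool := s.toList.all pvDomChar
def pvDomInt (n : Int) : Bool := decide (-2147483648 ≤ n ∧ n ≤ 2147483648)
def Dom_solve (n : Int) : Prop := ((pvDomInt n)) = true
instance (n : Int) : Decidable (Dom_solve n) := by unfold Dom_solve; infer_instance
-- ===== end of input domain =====

-- B replaces A's binary search for the minimal m with maxsum(m) ≥ n by a closed form
-- built from an integer square root (Newton iteration); objective: alternative (direct formula instead of search).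

-- maxsum is the identical helper of both Python files
def maxsum (m : Int) : Int := (1 + PySem.Int.floordiv m 2) * (1 + PySem.Int.floordiv (m + 1) 2)

-- needed by the ports' termination arguments (cited in decreasing_by)
lemma fd2 (t : Int) : PySem.Int.floordiv t 2 = t / 2 :=
  PySem.Int.floordiv_eq_ediv_of_pos (by norm_num)

lemma le_maxsum (t : Int) : t ≤ maxsum t := by
  simp only [maxsum, fd2]
  have h1 : 2 * (t / 2) ≤ t ∧ t ≤ 2 * (t / 2) + 1 := by omega
  have h2 : t / 2 + (t + 1) / 2 = t := by omega
  have h3 : (t + 1) / 2 = t / 2 ∨ (t + 1) / 2 = t / 2 + 1 := by omega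
  rcases h3 with h | h <;> nlinarith [sq_nonneg (t / 2), sq_nonneg (t / 2 + 1)]

-- ===== PORT A =====
-- inner 'while maxsum(x+b) < n: x += b' (the '1 ≤ b' conjunct is a totality guard only:
-- A's loop runs with b ≥ 1 always)
def innerA (n b x : Int) : Int :=
  if _h : maxsum (x + b) < n ∧ 1 ≤ b then innerA n b (x + b) else x
termination_by (n - x).toNat
decreasing_by
  have := le_maxsum (x + b); omega

-- outer 'while b >= 1: …; b //= 2'
def outerA (n b x : Int) : Int :=
  if _h : 1 ≤ b then outerA n (PySem.Int.floordiv b 2) (innerA n b x) else x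
termination_by b.toNat
decreasing_by
  rw [fd2]; omega

def solve (n : Int) : Int := outerA n 100000000 (-1) + 1

-- ===== PORT B =====
-- Newton loop of _isqrt: 'while y < x: x = y; y = (x + n//x)//2'
-- (the '1 ≤ x' conjunct is a totality guard only: unreachable states for n ≥ 1)
def isqrtLoop (n x y : Int) : Int :=
  if _h : y < x ∧ 1 ≤ x then
    isqrtLoop n y (PySem.Int.floordiv (y + PySem.Int.floordiv n y) 2)
  else x
termination_by x.toNat
decreasing_by omega

def isqrt (n : Int) : Int := isqrtLoop n n (PySem.Int.floordiv (n + 1) 2)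

def solve_alt (n : Int) : Int :=
  if n ≤ 1 then 0
  else
    let r := isqrt (n - 1)
    let m := 2 * r - 1
    if maxsum m ≥ n then m else m + 1

-- ===== PRECONDITION & SPEC =====
def Spec_solve (n : Int) (out : Int) : Prop := out = solve_alt n
instance (n : Int) (out : Int) : Decidable (Spec_solve n out) := by unfold Spec_solve; infer_instance

-- ===== CLAIM (what is proved, stated in full; the proofs are below) =====
def Claim_equal_solve : Prop := ∀ (n : Int), Dom_solve n → Spec_solve n (solve n)

-- ===== LEMMAS AND PROOFS =====

lemma maxsum_mono {a b : Int} (ha : -1 ≤ a) (hab : a ≤ b) : maxsum a ≤ maxsum b := by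
  simp only [maxsum, fd2]
  exact mul_le_mul (by omega) (by omega) (by omega) (by omega)

-- the value both programs return is the unique z ≥ 0 with maxsum z ≥ n and (z = 0 or maxsum (z-1) < n)
lemma ans_unique {n z1 z2 : Int}
    (h1 : 0 ≤ z1 ∧ n ≤ maxsum z1 ∧ (z1 = 0 ∨ maxsum (z1 - 1) < n))
    (h2 : 0 ≤ z2 ∧ n ≤ maxsum z2 ∧ (z2 = 0 ∨ maxsum (z2 - 1) < n)) : z1 = z2 := by
  obtain ⟨hz1, hm1, he1⟩ := h1
  obtain ⟨hz2, hm2, he2⟩ := h2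
  rcases lt_trichotomy z1 z2 with h | h | h
  · rcases he2 with h0 | hlt
    · omega
    · have := maxsum_mono (a := z1) (b := z2 - 1) (by omega) (by omega); omega
  · exact h
  · rcases he1 with h0 | hlt
    · omega
    · have := maxsum_mono (a := z2) (b := z1 - 1) (by omega) (by omega); omega

lemma innerA_spec : ∀ (k : ℕ) (n b x : Int), (n - x).toNat ≤ k → 1 ≤ b → -1 ≤ x →
    (x = -1 ∨ maxsum x < n) →
    -1 ≤ innerA n b x ∧ (innerA n b x = -1 ∨ maxsum (innerA n b x) < n) ∧
      n ≤ maxsum (innerA n b x + b) := by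
  intro k
  induction k with
  | zero =>
      intro n b x hk hb hx hinv
      rw [innerA]
      have hms := le_maxsum (x + b)
      have hcond : ¬ (maxsum (x + b) < n ∧ 1 ≤ b) := by omega
      simp only [hcond, dite_false]
      exact ⟨hx, hinv, by omega⟩
  | succ k ih =>
      intro n b x hk hb hx hinv
      rw [innerA]
      by_cases h : maxsum (x + b) < n ∧ 1 ≤ b
      · simp only [h]
        have hms := le_maxsum (x + b)
        exact ih n b (x + b) (by omega) hb (by omega) (Or.inr h.1)
      · simp only [h, dite_false]
        exact ⟨hx, hinv, by omega⟩

lemma outerA_spec : ∀ (k : ℕ) (n b x : Int), b.toNat ≤ k → 1 ≤ b → -1 ≤ x →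
    (x = -1 ∨ maxsum x < n) →
    -1 ≤ outerA n b x ∧ (outerA n b x = -1 ∨ maxsum (outerA n b x) < n) ∧
      n ≤ maxsum (outerA n b x + 1) := by
  intro k
  induction k with
  | zero => intro n b x hk hb _ _; omega
  | succ k ih =>
      intro n b x hk hb hx hinv
      rw [outerA]
      simp only [show (1:Int) ≤ b from hb, dite_true]
      obtain ⟨hi1, hi2, hi3⟩ := innerA_spec (n - x).toNat n b x le_rfl hb hx hinv
      rw [fd2]
      by_cases h1 : b = 1
      · subst h1
        rw [outerA]
        norm_num
        exact ⟨hi1, hi2, by simpa using hi3⟩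
      · exact ih n (b / 2) (innerA n b x) (by omega) (by omega) hi1 hi2

lemma solve_char (n : Int) :
    0 ≤ solve n ∧ n ≤ maxsum (solve n) ∧ (solve n = 0 ∨ maxsum (solve n - 1) < n) := by
  obtain ⟨h1, h2, h3⟩ :=
    outerA_spec (100000000 : Int).toNat n 100000000 (-1) le_rfl (by norm_num) (by norm_num)
      (Or.inl rfl)
  unfold solve
  refine ⟨by omega, h3, ?_⟩
  rcases h2 with h | h
  · left; omega
  · right; simpa using h

-- Newton step never goes below any integer square root candidate (AM–GM)
lemma newton_ge (n x z : Int) (hx : 1 ≤ x) (hz : 0 ≤ z) (hzn : z * z ≤ n) :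
    z ≤ PySem.Int.floordiv (x + PySem.Int.floordiv n x) 2 := by
  rw [fd2, PySem.Int.floordiv_eq_ediv_of_pos (by omega : (0:Int) < x)]
  have hq1 : n / x * x ≤ n := Int.ediv_mul_le n (by omega)
  have hq2 : n < (n / x + 1) * x := Int.lt_ediv_add_one_mul_self n (by omega)
  have key : 2 * z ≤ x + n / x := by
    by_contra hcon
    push_neg at hcon
    nlinarith [sq_nonneg (x - z)]
  omega

lemma isqrtLoop_spec : ∀ (k : ℕ) (n x y : Int), x.toNat ≤ k → 1 ≤ n → 1 ≤ x →
    (∀ z : Int, 0 ≤ z → z * z ≤ n → z ≤ x) →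
    y = PySem.Int.floordiv (x + PySem.Int.floordiv n x) 2 →
    isqrtLoop n x y * isqrtLoop n x y ≤ n ∧
      ∀ z : Int, 0 ≤ z → z * z ≤ n → z ≤ isqrtLoop n x y := by
  intro k
  induction k with
  | zero => intro n x y hk hn hx _ _; omega
  | succ k ih =>
      intro n x y hk hn hx hinv hy
      rw [isqrtLoop]
      by_cases h : y < x ∧ 1 ≤ x
      · simp only [h]
        have hy1 : 1 ≤ y := by
          have := newton_ge n x 1 hx (by norm_num) (by omega)
          omega
        refine ih n y _ (by omega) hn hy1 ?_ rfl
        intro z hz hzn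
        rw [hy]; exact newton_ge n x z hx hz hzn
      · simp only [h, dite_false]
        have hxy : x ≤ y := by
          rcases not_and_or.mp h with h' | h' <;> omega
        refine ⟨?_, hinv⟩
        rw [fd2, PySem.Int.floordiv_eq_ediv_of_pos (by omega : (0:Int) < x)] at hy
        have hxq : x ≤ n / x := by omega
        have := Int.ediv_mul_le n (show x ≠ 0 by omega)
        nlinarith

lemma isqrt_spec (n : Int) (hn : 1 ≤ n) :
    isqrt n * isqrt n ≤ n ∧ n < (isqrt n + 1) * (isqrt n + 1) ∧ 1 ≤ isqrt n := by
  have hself : PySem.Int.floordiv n n = 1 := by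
    rw [PySem.Int.floordiv_eq_ediv_of_pos (by omega : (0:Int) < n)]
    exact Int.ediv_self (by omega)
  have hstart : PySem.Int.floordiv (n + 1) 2 =
      PySem.Int.floordiv (n + PySem.Int.floordiv n n) 2 := by rw [hself]
  obtain ⟨h1, h2⟩ :=
    isqrtLoop_spec n.toNat n n (PySem.Int.floordiv (n + 1) 2) le_rfl hn hn
      (fun z _hz hzn => by nlinarith) hstart
  unfold isqrt
  set t := isqrtLoop n n (PySem.Int.floordiv (n + 1) 2) with ht
  have ht1 : 1 ≤ t := h2 1 (by norm_num) (by omega)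
  refine ⟨h1, ?_, ht1⟩
  by_contra hcon
  push_neg at hcon
  have := h2 (t + 1) (by omega) hcon
  omega

lemma maxsum_two_mul (s : Int) : maxsum (2 * s) = (s + 1) * (s + 1) := by
  simp only [maxsum, fd2]
  have h1 : 2 * s / 2 = s := by omega
  have h2 : (2 * s + 1) / 2 = s := by omega
  rw [h1, h2]; ring

lemma maxsum_two_mul_sub_one (s : Int) : maxsum (2 * s - 1) = s * (s + 1) := by
  simp only [maxsum, fd2]
  have h1 : (2 * s - 1) / 2 = s - 1 := by omega
  have h2 : (2 * s - 1 + 1) / 2 = s := by omega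
  rw [h1, h2]; ring

lemma solve_alt_char (n : Int) :
    0 ≤ solve_alt n ∧ n ≤ maxsum (solve_alt n) ∧
      (solve_alt n = 0 ∨ maxsum (solve_alt n - 1) < n) := by
  unfold solve_alt
  by_cases hn : n ≤ 1
  · simp only [hn, if_true]
    refine ⟨le_rfl, ?_, by simp⟩
    have : maxsum 0 = 1 := by decide
    omega
  · simp only [hn, if_false]
    push_neg at hn
    obtain ⟨hs1, hs2, hs3⟩ := isqrt_spec (n - 1) (by omega)
    set s := isqrt (n - 1) with hs
    have hm0 : maxsum (2 * s) = (s + 1) * (s + 1) := maxsum_two_mul s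
    have hm1 : maxsum (2 * s - 1) = s * (s + 1) := maxsum_two_mul_sub_one s
    have hm2 : maxsum (2 * s - 1 - 1) = s * s := by
      have : 2 * s - 1 - 1 = 2 * (s - 1) := by ring
      rw [this, maxsum_two_mul]; ring
    by_cases hcase : maxsum (2 * s - 1) ≥ n
    · rw [if_pos hcase]
      exact ⟨by omega, hcase, Or.inr (by omega)⟩
    · rw [if_neg hcase]
      push_neg at hcase
      have he : 2 * s - 1 + 1 = 2 * s := by ring
      rw [he]
      exact ⟨by omega, by omega, Or.inr (by simpa using hcase)⟩

-- ===== VERDICT (by name: the statement is the Claim_ definition above) =====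
theorem solve_spec : Claim_equal_solve := by
  intro n _
  unfold Spec_solve
  exact ans_unique (solve_char n) (solve_alt_char n)
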